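-- pv_equiv track=rewrite | github.com/pypi-data/pypi-mirror-89 | packages/pixel-classifier-torch/pixel_classifier_torch-0.2.tar.gz/pixel_classifier_torch-0.2/segmentation/postprocessing/marginialia_detection.py | cluster_1d
-- ===== SOURCE A (Python) =====
-- def cluster_1d(data, maxgap):
--     data.sort()
--     groups = [[data[0]]]
--     for x in data[1:]:
--         if abs(x - groups[-1][-1]) <= maxgap:
--             groups[-1].append(x)
--         else:
--             groups.append([x])
--     return groups
-- ===== SOURCE B (Python) =====
-- def cluster_1d(data, maxgap):
--     # Same in-place sort as A; builds the groups by cutting at the gap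
--     # boundaries and slicing, instead of growing a last group element by element.
--     data.sort()
--     cuts = [i for i in range(1, len(data)) if data[i] - data[i - 1] > maxgap]
--     bounds = [0] + cuts + [len(data)]
--     return [data[s:e] for s, e in zip(bounds, bounds[1:])]
-- ===== Notes on version B (the rewrite author's own statement) =====
-- stated objective: alternative
-- what changed: Instead of A's single pass that grows the last group in a list of groups, B computes the gap cut indices in one comprehension and then builds each group by slicing the sorted list between consecutive bounds.
import Mathlib
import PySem

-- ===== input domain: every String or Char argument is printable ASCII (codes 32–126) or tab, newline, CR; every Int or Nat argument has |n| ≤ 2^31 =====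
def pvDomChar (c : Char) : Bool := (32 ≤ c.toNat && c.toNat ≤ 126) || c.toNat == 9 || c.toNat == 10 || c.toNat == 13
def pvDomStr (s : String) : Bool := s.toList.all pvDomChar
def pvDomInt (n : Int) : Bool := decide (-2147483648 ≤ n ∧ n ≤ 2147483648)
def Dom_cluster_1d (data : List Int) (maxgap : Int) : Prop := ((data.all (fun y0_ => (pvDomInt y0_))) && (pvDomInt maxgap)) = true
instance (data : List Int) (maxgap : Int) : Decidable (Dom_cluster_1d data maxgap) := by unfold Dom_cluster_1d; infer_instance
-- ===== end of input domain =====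

-- B replaces A's grow-the-last-group single pass by a cut-index scan plus slicing
-- between consecutive bounds (same cost; 'alternative'); both sort the list in
-- place — the equivalence proved is about the return value, and B performs the
-- same in-place sort.


-- ===== PORT A =====
-- groups[-1][-1] (the defaults are unreachable: groups and its last group are never empty)
def pvLastVal (groups : List (List Int)) : Int :=
  (groups.getLast?.getD []).getLast?.getD 0

-- one iteration of A's for-loop: append to the last group or start a new one
def pvStepA (maxgap : Int) (groups : List (List Int)) (x : Int) : List (List Int) :=
  if |x - pvLastVal groups| ≤ maxgap then
    groups.dropLast ++ [(groups.getLast?.getD []) ++ [x]]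
  else
    groups ++ [[x]]

def cluster_1d (data : List Int) (maxgap : Int) : List (List Int) :=
  match PySem.List.sorted data (fun x => x) false with
  | [] => []          -- Python raises IndexError on data[0] here; excluded by Pre_
  | h :: t => t.foldl (pvStepA maxgap) [[h]]

-- ===== PORT B =====
-- data[i] - data[i - 1] > maxgap, the cut test of Source B (indices 1 ≤ i < len are in range)
def pvCut (d : List Int) (maxgap : Int) (i : Int) : Bool :=
  PySem.List.pyGetD d i 0 - PySem.List.pyGetD d (i - 1) 0 > maxgap

def cluster_1d_alt (data : List Int) (maxgap : Int) : List (List Int) :=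
  let d := PySem.List.sorted data (fun x => x) false
  let n : Int := d.length
  let cuts := (PySem.List.pyRange 1 n 1).filter (pvCut d maxgap)
  let bounds := 0 :: (cuts ++ [n])
  (bounds.zip bounds.tail).map (fun p => PySem.List.slice d (some p.1) (some p.2))

-- ===== PRECONDITION & SPEC =====
-- A evaluates data[0] and raises IndexError on the empty list; only that input is excluded.
def Pre_cluster_1d (data : List Int) (maxgap : Int) : Prop := data ≠ []
instance (data : List Int) (maxgap : Int) : Decidable (Pre_cluster_1d data maxgap) := by
  unfold Pre_cluster_1d; infer_instance

def pvWitness_cluster_1d : List Int × Int := ([3, 1, 2, 9], 2)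

def Spec_cluster_1d (data : List Int) (maxgap : Int) (out : List (List Int)) : Prop := out = cluster_1d_alt data maxgap
instance (data : List Int) (maxgap : Int) (out : List (List Int)) : Decidable (Spec_cluster_1d data maxgap out) := by unfold Spec_cluster_1d; infer_instance

-- ===== CLAIM (what is proved, stated in full; the proofs are below) =====
def Claim_equal_cluster_1d : Prop := ∀ (data : List Int) (maxgap : Int), Dom_cluster_1d data maxgap → Pre_cluster_1d data maxgap → Spec_cluster_1d data maxgap (cluster_1d data maxgap)

-- ===== LEMMAS AND PROOFS =====

-- reference clustering: given the previous element p, split the remaining sorted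
-- elements into the continuation of p's group and the list of later groups
def pvCl (maxgap : Int) : Int → List Int → List Int × List (List Int)
  | _, [] => ([], [])
  | p, x :: xs =>
      let r := pvCl maxgap x xs
      if |x - p| ≤ maxgap then (x :: r.1, r.2) else ([], (x :: r.1) :: r.2)

-- B's slice-built result when the current group starts at index s
def pvRES (d : List Int) (maxgap : Int) (s : Int) : List (List Int) :=
  ((s :: ((PySem.List.pyRange (s + 1) (d.length : Int) 1).filter (pvCut d maxgap) ++ [(d.length : Int)])).zip
      ((PySem.List.pyRange (s + 1) (d.length : Int) 1).filter (pvCut d maxgap) ++ [(d.length : Int)])).map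
    (fun p => PySem.List.slice d (some p.1) (some p.2))

lemma pvSlice_peel (d : List Int) (s : Nat) (e : Int) (hs : s < d.length) (he : (s : Int) < e) :
    PySem.List.slice d (some (s : Int)) (some e) = d[s] :: PySem.List.slice d (some ((s : Int) + 1)) (some e) := by
  have h0 : (0:Int) ≤ (s:Int) := by omega
  have h1 : (0:Int) ≤ e := by omega
  rw [PySem.List.slice_toNat d h0 h1, PySem.List.slice_toNat d (by omega) h1]
  have hst : (s:Int).toNat = s := by omega
  have hst1 : ((s:Int) + 1).toNat = s + 1 := by omega
  have hlt : s < e.toNat := by omega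
  rw [hst, hst1, List.drop_eq_getElem_cons hs]
  have : e.toNat - s = (e.toNat - (s + 1)) + 1 := by omega
  rw [this, List.take_succ_cons]

lemma pvCut_eval (d : List Int) (maxgap : Int) (s : Nat) (h : s + 1 < d.length) :
    pvCut d maxgap ((s : Int) + 1) = decide (d[s+1]'h - d[s]'(by omega) > maxgap) := by
  have e1 : ((s:Int) + 1) = ((s+1 : Nat) : Int) := by push_cast; ring
  have e2 : (((s+1 : Nat) : Int) - 1) = ((s : Nat) : Int) := by push_cast; ring
  simp only [pvCut, e1, e2, PySem.List.pyGetD_natCast]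
  rw [List.getD_eq_getElem d 0 h, List.getD_eq_getElem d 0 (by omega : s < d.length)]

lemma pvB_main (d : List Int) (maxgap : Int)
    (hadj : ∀ (k : Nat) (h : k + 1 < d.length), d[k]'(by omega) ≤ d[k+1]'h) :
    ∀ (fuel s : Nat), (hs : s < d.length) → d.length - s = fuel + 1 →
      pvRES d maxgap (s : Int) =
        (d[s] :: (pvCl maxgap d[s] (d.drop (s + 1))).1) :: (pvCl maxgap d[s] (d.drop (s + 1))).2 := by
  intro fuel
  induction fuel with
  | zero =>
    intro s hs hfuel
    have hlen : d.length = s + 1 := by omega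
    have hrange : PySem.List.pyRange ((s:Int) + 1) (d.length : Int) 1 = [] := by
      apply PySem.List.pyRange_one_eq_nil; omega
    have hdrop : d.drop (s + 1) = [] := by
      apply List.drop_eq_nil_of_le; omega
    simp only [pvRES, hrange, List.filter_nil, List.nil_append, List.zip_cons_cons,
      List.zip_nil_right, List.map_cons, List.map_nil, hdrop, pvCl]
    congr 1
    rw [PySem.List.slice_toNat d (by omega) (by omega)]
    have : ((d.length : Int)).toNat = d.length := by omega
    rw [this]
    have hst : ((s:Int)).toNat = s := by omega
    rw [hst, List.drop_eq_getElem_cons hs, hdrop]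
    simp [hlen]
  | succ fuel ih =>
    intro s hs hfuel
    have hs1 : s + 1 < d.length := by omega
    have hrange : PySem.List.pyRange ((s:Int) + 1) (d.length : Int) 1
        = ((s:Int) + 1) :: PySem.List.pyRange ((s:Int) + 1 + 1) (d.length : Int) 1 := by
      apply PySem.List.pyRange_one_cons; omega
    have npush : ((s:Int) + 1) = ((s+1 : Nat) : Int) := by push_cast; ring
    have hdrop : d.drop (s + 1) = d[s+1] :: d.drop (s + 1 + 1) := List.drop_eq_getElem_cons hs1
    have hih := ih (s + 1) hs1 (by omega)
    have hmono := hadj s hs1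
    simp only [pvRES] at hih
    by_cases hcut : d[s+1] - d[s]'(by omega) > maxgap
    · -- cut between s and s+1: a new group starts at s+1
      have habs : ¬ |d[s+1] - d[s]'(by omega)| ≤ maxgap := by
        rw [abs_of_nonneg (by omega)]; omega
      simp only [pvRES, hrange, List.filter_cons, pvCut_eval d maxgap s hs1,
        decide_eq_true hcut, if_true]
      rw [npush]
      simp only [List.cons_append, List.zip_cons_cons, List.map_cons]
      rw [hih]
      have hslice : PySem.List.slice d (some (s:Int)) (some ((s:Int)+1)) = [d[s]] := by
        rw [pvSlice_peel d s ((s:Int)+1) hs (by omega)]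
        rw [PySem.List.slice_toNat d (by omega) (by omega)]
        simp
      rw [npush] at hslice
      rw [hslice, hdrop]
      simp only [pvCl]
      rw [if_neg habs]
    · -- no cut: d[s+1] joins the group of d[s]
      have habs : |d[s+1] - d[s]'(by omega)| ≤ maxgap := by
        rw [abs_of_nonneg (by omega)]; omega
      simp only [pvRES, hrange, List.filter_cons, pvCut_eval d maxgap s hs1,
        decide_eq_false hcut]
      rw [if_neg Bool.false_ne_true, npush]
      obtain ⟨e, r, hrest⟩ : ∃ e r, (PySem.List.pyRange (((s+1:Nat):Int) + 1) (d.length : Int) 1).filter (pvCut d maxgap) ++ [(d.length : Int)] = e :: r := by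
        cases hcs : (PySem.List.pyRange (((s+1:Nat):Int) + 1) (d.length : Int) 1).filter (pvCut d maxgap) with
        | nil => exact ⟨(d.length : Int), [], by simp [hcs]⟩
        | cons a t => exact ⟨a, t ++ [(d.length : Int)], by simp⟩
      have he : (s : Int) < e := by
        cases hcs : (PySem.List.pyRange (((s+1:Nat):Int) + 1) (d.length : Int) 1).filter (pvCut d maxgap) with
        | nil => rw [hcs] at hrest; simp at hrest; omega
        | cons a t =>
          rw [hcs] at hrest
          simp only [List.cons_append, List.cons.injEq] at hrest
          have ha : a ∈ PySem.List.pyRange (((s+1:Nat):Int) + 1) (d.length : Int) 1 := by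
            have : a ∈ (PySem.List.pyRange (((s+1:Nat):Int) + 1) (d.length : Int) 1).filter (pvCut d maxgap) := by
              rw [hcs]; exact List.mem_cons_self
            exact List.mem_of_mem_filter this
          rw [PySem.List.mem_pyRange_one] at ha
          omega
      rw [hrest] at hih ⊢
      simp only [List.zip_cons_cons, List.map_cons] at hih ⊢
      rw [List.cons_eq_cons] at hih
      obtain ⟨h1, h2⟩ := hih
      rw [pvSlice_peel d s e hs he, npush, h1, h2, hdrop]
      simp only [pvCl]
      rw [if_pos habs]

lemma pvLastVal_concat (G : List (List Int)) (g : List Int) (hg : g ≠ []) :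
    pvLastVal (G ++ [g]) = g.getLast hg := by
  simp [pvLastVal, List.getLast?_eq_getLast_of_ne_nil hg]

lemma pvA_fold (maxgap : Int) :
    ∀ (l : List Int) (G : List (List Int)) (g : List Int) (hg : g ≠ []),
      l.foldl (pvStepA maxgap) (G ++ [g]) =
        G ++ ((g ++ (pvCl maxgap (g.getLast hg) l).1) :: (pvCl maxgap (g.getLast hg) l).2) := by
  intro l
  induction l with
  | nil => intro G g hg; simp [pvCl]
  | cons x xs ih =>
    intro G g hg
    simp only [List.foldl_cons, pvStepA, pvLastVal_concat G g hg, pvCl]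
    by_cases h : |x - g.getLast hg| ≤ maxgap
    · rw [if_pos h]
      simp only [List.dropLast_concat, List.getLast?_concat, Option.getD_some]
      have hgx : g ++ [x] ≠ [] := by simp
      rw [ih G (g ++ [x]) hgx]
      simp [h]
    · rw [if_neg h]
      rw [ih (G ++ [g]) [x] (by simp)]
      simp [h]

-- ===== VERDICT (by name: the statement is the Claim_ definition above) =====
theorem cluster_1d_spec : Claim_equal_cluster_1d := by
  intro data maxgap _hdom hpre
  unfold Spec_cluster_1d
  have hdne : PySem.List.sorted data (fun x => x) false ≠ [] := by
    rw [Ne, PySem.List.sorted_eq_nil_iff]; exact hpre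
  obtain ⟨h, t, heq⟩ := List.exists_cons_of_ne_nil hdne
  set d := PySem.List.sorted data (fun x => x) false with hd
  have hlen : 0 < d.length := by rw [heq]; simp
  have hadj : ∀ (k : Nat) (hk : k + 1 < d.length), d[k]'(by omega) ≤ d[k+1]'hk := by
    intro k hk
    exact PySem.List.sorted_id_getElem_mono data (p := k) (q := k + 1) (by omega) hk
  -- B's port is pvRES at 0
  have hB : cluster_1d_alt data maxgap = pvRES d maxgap 0 := by
    simp only [cluster_1d_alt, pvRES, ← hd, List.tail_cons]
    norm_num
  -- evaluate both sides through the common reference pvCl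
  have hB' := pvB_main d maxgap hadj (d.length - 1) 0 hlen (by omega)
  have hA := pvA_fold maxgap t [] [h] (by simp)
  rw [cluster_1d.eq_def, ← hd, heq]
  show List.foldl (pvStepA maxgap) [[h]] t = _
  simp only [List.nil_append, List.getLast_singleton] at hA
  rw [hA, hB]
  norm_num at hB'
  rw [hB']
  have h0 : d[0]'hlen = h := by simp [heq]
  have h1 : d.tail = t := by simp [heq]
  simp [h0, h1]
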